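-- pv_equiv track=rewrite | github.com/hocally/qmsolver | main.py | sortbyones
-- ===== SOURCE A (Python) =====
-- def ones(N):
-- 	o = 0
-- 	for B in N:
-- 		if B == '1':
-- 			o += 1
-- 	return o
--
-- def sortbyones(L):
-- 	c = 0
-- 	s = True
-- 	while True:
-- 		s = True
-- 		c = 0
-- 		while c < len(L) - 1:
-- 			if ones(L[c]) > ones(L[c + 1]):
-- 				s = False
-- 				t = L[c + 1]
-- 				L[c + 1] = L[c]
-- 				L[c] = t
-- 			c += 1
-- 		if s:
-- 			break
-- 	return L
-- ===== SOURCE B (Python) =====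
-- def ones(N):
-- 	o = 0
-- 	for B in N:
-- 		if B == '1':
-- 			o += 1
-- 	return o
--
-- def sortbyones(L):
-- 	# counting sort on the ones-count: compute each key once, emit key classes
-- 	# in ascending order (stable); writes back in place like the original.
-- 	keyed = [(ones(s), s) for s in L]
-- 	m = -1
-- 	for c, _s in keyed:
-- 		m = max(m, c)
-- 	out = []
-- 	for k in range(0, m + 1):
-- 		out.extend(s for c, s in keyed if c == k)
-- 	L[:] = out
-- 	return L
-- ===== Notes on version B (the rewrite author's own statement) =====
-- stated objective: faster
-- what changed: Replaces the repeated bubble-sort passes (which recompute the ones-count at every comparison) with a counting sort: each string's ones-count is computed once, then the output is built by emitting the key classes in ascending key order, preserving input order within a class (stable), and written back with L[:]=out.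
import Mathlib
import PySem

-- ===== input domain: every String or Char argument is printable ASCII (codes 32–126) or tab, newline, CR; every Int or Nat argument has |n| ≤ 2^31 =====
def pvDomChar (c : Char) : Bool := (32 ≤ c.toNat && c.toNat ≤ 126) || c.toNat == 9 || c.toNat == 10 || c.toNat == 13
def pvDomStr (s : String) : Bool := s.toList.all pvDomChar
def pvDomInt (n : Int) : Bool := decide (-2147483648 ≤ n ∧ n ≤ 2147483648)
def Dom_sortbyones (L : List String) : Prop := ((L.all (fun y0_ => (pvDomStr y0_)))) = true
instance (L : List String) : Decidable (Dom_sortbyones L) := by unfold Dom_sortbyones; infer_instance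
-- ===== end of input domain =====

-- B replaces A's bubble sort with a stable counting sort on the ones-count (each key
-- computed once).  Both Pythons write the result back into L in place and return L;
-- the equivalence proved here is about the return value.

-- ===== PORT A =====
-- helper ones(N) (identical in Source A and Source B)
def pvOnes (N : String) : Int :=
  N.toList.foldl (fun o B => if B == '1' then o + 1 else o) 0

-- one inner 'while c < len(L)-1' pass of A's bubble sort: returns the reshuffled
-- list and the flag s (true = no swap happened in the pass)
def pvPass : List String → List String × Bool
  | [] => ([], true)
  | [x] => ([x], true)
  | x :: y :: t =>
    if pvOnes x > pvOnes y then
      (y :: (pvPass (x :: t)).1, false)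
    else
      let r := pvPass (y :: t)
      (x :: r.1, r.2)

-- termination measure for A's outer 'while True' loop: number of inverted pairs
def pvInv : List String → Nat
  | [] => 0
  | x :: t => t.countP (fun y => pvOnes y < pvOnes x) + pvInv t

-- the three lemmas below are cited by the port's decreasing_by, so they stay above it
theorem pvPass_perm (L : List String) : (pvPass L).1.Perm L := by
  fun_induction pvPass L with
  | case1 => simp
  | case2 x => simp
  | case3 x y t h ih =>
      exact (ih.cons y).trans (List.Perm.swap x y t)
  | case4 x y t h r ih =>
      exact ih.cons x

theorem pvPass_inv_le (L : List String) : pvInv (pvPass L).1 ≤ pvInv L := by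
  fun_induction pvPass L with
  | case1 => simp [pvInv]
  | case2 x => simp [pvInv]
  | case3 x y t h ih =>
      have hcnt := (pvPass_perm (x :: t)).countP_eq (fun z => decide (pvOnes z < pvOnes y))
      simp only [List.countP_cons, decide_eq_true_eq] at hcnt
      have h3 : pvInv (pvPass (x :: t)).1 ≤ t.countP (fun z => decide (pvOnes z < pvOnes x)) + pvInv t := by
        simpa [pvInv] using ih
      show pvInv (y :: (pvPass (x :: t)).1) ≤ _
      simp only [pvInv, List.countP_cons, decide_eq_true_eq]
      split_ifs at * <;> omega
  | case4 x y t h r ih =>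
      show pvInv (x :: (pvPass (y :: t)).1) ≤ _
      have hc1 := (pvPass_perm (y :: t)).countP_eq (fun z => decide (pvOnes z < pvOnes x))
      simp only [pvInv, List.countP_cons] at *
      omega

theorem pvPass_false_inv (L : List String) (h : (pvPass L).2 = false) :
    pvInv (pvPass L).1 < pvInv L := by
  fun_induction pvPass L with
  | case1 => simp at h
  | case2 x => simp at h
  | case3 x y t hgt ih =>
      have hcnt := (pvPass_perm (x :: t)).countP_eq (fun z => decide (pvOnes z < pvOnes y))
      simp only [List.countP_cons, decide_eq_true_eq] at hcnt
      have h3 : pvInv (pvPass (x :: t)).1 ≤ t.countP (fun z => decide (pvOnes z < pvOnes x)) + pvInv t := by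
        simpa [pvInv] using pvPass_inv_le (x :: t)
      show pvInv (y :: (pvPass (x :: t)).1) < _
      simp only [pvInv, List.countP_cons, decide_eq_true_eq]
      split_ifs at * <;> omega
  | case4 x y t hgt r ih =>
      have hr : (pvPass (y :: t)).2 = false := h
      have := ih hr
      show pvInv (x :: (pvPass (y :: t)).1) < _
      have hc1 := (pvPass_perm (y :: t)).countP_eq (fun z => decide (pvOnes z < pvOnes x))
      simp only [pvInv, List.countP_cons] at *
      omega

-- the outer 'while True' loop of A (the pass made no swap ⇒ return the list)
def sortbyones (L : List String) : List String :=
  if (pvPass L).2 then (pvPass L).1 else sortbyones (pvPass L).1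
termination_by pvInv L
decreasing_by
  exact pvPass_false_inv L (Bool.eq_false_iff.mpr ‹_›)

-- ===== PORT B =====
def sortbyones_alt (L : List String) : List String :=
  let keyed := L.map (fun s => (pvOnes s, s))
  let m := keyed.foldl (fun acc p => max acc p.1) (-1 : Int)
  (PySem.List.pyRange 0 (m + 1) 1).foldl
    (fun out k => out ++ (keyed.filter (fun p => p.1 == k)).map Prod.snd) []

-- ===== PRECONDITION & SPEC =====
def Spec_sortbyones (L : List String) (out : List String) : Prop := out = sortbyones_alt L
instance (L : List String) (out : List String) : Decidable (Spec_sortbyones L out) := by unfold Spec_sortbyones; infer_instance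

-- ===== CLAIM (what is proved, stated in full; the proofs are below) =====
def Claim_equal_sortbyones : Prop := ∀ (L : List String), Dom_sortbyones L → Spec_sortbyones L (sortbyones L)

-- ===== LEMMAS AND PROOFS =====

theorem pvOnes_eq (N : String) : pvOnes N = (N.toList.count '1' : Int) := by
  simpa [pvOnes] using PySem.List.foldl_beq_add_one (l := N.toList) (v := '1') (a := 0)

theorem pvOnes_nonneg (N : String) : 0 ≤ pvOnes N := by
  rw [pvOnes_eq]; positivity

-- a pass that reports no swap returned its input unchanged
theorem pvPass_true (L : List String) (h : (pvPass L).2 = true) : (pvPass L).1 = L := by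
  fun_induction pvPass L with
  | case1 => rfl
  | case2 x => rfl
  | case3 x y t hgt ih => simp at h
  | case4 x y t hgt r ih => simpa using ih h

-- a pass that reports no swap certifies the list is sorted by ones-count
theorem pvPass_sorted (L : List String) (h : (pvPass L).2 = true) :
    L.Pairwise (fun a b => pvOnes a ≤ pvOnes b) := by
  fun_induction pvPass L with
  | case1 => simp
  | case2 x => simp
  | case3 x y t hgt ih => simp at h
  | case4 x y t hgt r ih =>
      have hyt := ih h
      rcases List.pairwise_cons.mp hyt with ⟨hy1, ht⟩
      refine List.pairwise_cons.mpr ⟨?_, hyt⟩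
      intro z hz
      rcases List.mem_cons.mp hz with rfl | hz'
      · omega
      · have := hy1 z hz'; omega

-- a pass never changes the subsequence of elements of any given key
theorem pvPass_filter (L : List String) (k : Int) :
    (pvPass L).1.filter (fun x => pvOnes x == k) = L.filter (fun x => pvOnes x == k) := by
  fun_induction pvPass L with
  | case1 => rfl
  | case2 x => rfl
  | case3 x y t hgt ih =>
      show (y :: (pvPass (x :: t)).1).filter _ = _
      by_cases hx : pvOnes x = k <;> by_cases hy : pvOnes y = k
      · omega
      · simp only [List.filter_cons, ih]
        simp [hx, hy]
      · simp only [List.filter_cons, ih]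
        simp [hx, hy]
      · simp only [List.filter_cons, ih]
        simp [hx, hy]
  | case4 x y t hgt r ih =>
      show (x :: (pvPass (y :: t)).1).filter _ = _
      simp only [List.filter_cons, ih]

theorem bubble_filter (L : List String) (k : Int) :
    (sortbyones L).filter (fun x => pvOnes x == k) = L.filter (fun x => pvOnes x == k) := by
  fun_induction sortbyones L with
  | case1 L h => exact pvPass_filter L k
  | case2 L h ih => exact ih.trans (pvPass_filter L k)

theorem bubble_sorted (L : List String) :
    (sortbyones L).Pairwise (fun a b => pvOnes a ≤ pvOnes b) := by
  fun_induction sortbyones L with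
  | case1 L h => rw [pvPass_true L h]; exact pvPass_sorted L h
  | case2 L h ih => exact ih

theorem keyed_filter (L : List String) (k : Int) :
    ((L.map (fun s => (pvOnes s, s))).filter (fun p => p.1 == k)).map Prod.snd
      = L.filter (fun s => pvOnes s == k) := by
  rw [List.filter_map, List.map_map]
  simp [Function.comp_def]

theorem alt_eq (L : List String) :
    sortbyones_alt L
      = (PySem.List.pyRange 0
          ((L.map (fun s => (pvOnes s, s))).foldl (fun acc p => max acc p.1) (-1 : Int) + 1) 1).flatMap
          (fun k => L.filter (fun s => pvOnes s == k)) := by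
  unfold sortbyones_alt
  rw [PySem.List.foldl_append_eq_flatMap]
  simp only [List.nil_append]
  congr 1
  funext k
  exact keyed_filter L k

theorem flatMap_sorted (ks : List Int) (L : List String) (hks : ks.Pairwise (· < ·)) :
    (ks.flatMap (fun k => L.filter (fun s => pvOnes s == k))).Pairwise
      (fun a b => pvOnes a ≤ pvOnes b) := by
  induction ks with
  | nil => simp
  | cons k ks ih =>
      rcases List.pairwise_cons.mp hks with ⟨hk, hks'⟩
      simp only [List.flatMap_cons]
      refine List.pairwise_append.mpr ⟨?_, ih hks', ?_⟩
      · refine List.pairwise_of_forall_mem_list ?_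
        intro a ha b hb
        have ha' := (List.mem_filter.mp ha).2
        have hb' := (List.mem_filter.mp hb).2
        simp only [beq_iff_eq] at ha' hb'
        omega
      · intro a ha b hb
        have ha' := (List.mem_filter.mp ha).2
        rcases List.mem_flatMap.mp hb with ⟨k', hk', hbk⟩
        have hb' := (List.mem_filter.mp hbk).2
        simp only [beq_iff_eq] at ha' hb'
        have := hk k' hk'
        omega

theorem filter_flatMap (ks : List Int) (L : List String) (k : Int) (hnd : ks.Nodup) :
    (ks.flatMap (fun k' => L.filter (fun s => pvOnes s == k'))).filter (fun s => pvOnes s == k)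
      = if k ∈ ks then L.filter (fun s => pvOnes s == k) else [] := by
  induction ks with
  | nil => simp
  | cons k' ks ih =>
      rcases List.nodup_cons.mp hnd with ⟨hk', hnd'⟩
      simp only [List.flatMap_cons, List.filter_append]
      by_cases hkk : k = k'
      · subst hkk
        have h1 : (L.filter (fun s => pvOnes s == k)).filter (fun s => pvOnes s == k)
            = L.filter (fun s => pvOnes s == k) := by
          rw [List.filter_filter]; simp
        rw [h1, ih hnd', if_neg hk', if_pos (List.mem_cons_self)]
        simp
      · have h1 : (L.filter (fun s => pvOnes s == k')).filter (fun s => pvOnes s == k) = [] := by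
          rw [List.filter_filter]
          refine List.filter_eq_nil_iff.mpr ?_
          intro a _
          simp only [Bool.and_eq_true, beq_iff_eq]
          omega
        rw [h1, ih hnd']
        by_cases hmem : k ∈ ks <;> simp [hmem, hkk]

theorem alt_filter (L : List String) (k : Int) :
    (sortbyones_alt L).filter (fun x => pvOnes x == k) = L.filter (fun x => pvOnes x == k) := by
  rw [alt_eq, filter_flatMap _ _ _ (PySem.List.nodup_pyRange_one _ _)]
  split
  · rfl
  · rename_i hmem
    refine (List.filter_eq_nil_iff.mpr ?_).symm
    intro s hs hks
    simp only [beq_iff_eq] at hks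
    apply hmem
    rw [PySem.List.mem_pyRange_one]
    have h0 : 0 ≤ pvOnes s := pvOnes_nonneg s
    have hle := (PySem.List.le_foldl_max_int (L.map (fun s => (pvOnes s, s))) Prod.fst (-1)).2
        (pvOnes s, s) (List.mem_map.mpr ⟨s, hs, rfl⟩)
    simp only [← hks]
    constructor
    · omega
    · exact lt_of_le_of_lt hle (by omega)

theorem alt_sorted (L : List String) :
    (sortbyones_alt L).Pairwise (fun a b => pvOnes a ≤ pvOnes b) := by
  rw [alt_eq]
  exact flatMap_sorted _ _ (PySem.List.pairwise_lt_pyRange_one _ _)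

-- a key-sorted list is determined by its per-key subsequences (stable-sort uniqueness)
theorem stable_unique (ys zs : List String)
    (hy : ys.Pairwise (fun a b => pvOnes a ≤ pvOnes b))
    (hz : zs.Pairwise (fun a b => pvOnes a ≤ pvOnes b))
    (hf : ∀ k, ys.filter (fun x => pvOnes x == k) = zs.filter (fun x => pvOnes x == k)) :
    ys = zs := by
  induction ys generalizing zs with
  | nil =>
      cases zs with
      | nil => rfl
      | cons z zs' =>
          have h := hf (pvOnes z)
          simp at h
  | cons y ys' ih =>
      cases zs with
      | nil =>
          have h := hf (pvOnes y)
          simp at h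
      | cons z zs' =>
          rcases List.pairwise_cons.mp hy with ⟨hy1, hy'⟩
          rcases List.pairwise_cons.mp hz with ⟨hz1, hz'⟩
          have hyz : pvOnes y = pvOnes z := by
            have h1 : z ∈ (y :: ys').filter (fun x => pvOnes x == pvOnes z) := by
              rw [hf]; simp
            have h2 : y ∈ (z :: zs').filter (fun x => pvOnes x == pvOnes y) := by
              rw [← hf]; simp
            have h1' := (List.mem_filter.mp h1).1
            have h2' := (List.mem_filter.mp h2).1
            have hle1 : pvOnes y ≤ pvOnes z := by
              rcases List.mem_cons.mp h1' with rfl | hm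
              · omega
              · exact hy1 z hm
            have hle2 : pvOnes z ≤ pvOnes y := by
              rcases List.mem_cons.mp h2' with rfl | hm
              · omega
              · exact hz1 y hm
            omega
          have hf0 := hf (pvOnes y)
          simp only [List.filter_cons] at hf0
          rw [if_pos (by simp), if_pos (by simp [hyz])] at hf0
          obtain ⟨rfl, htl⟩ := List.cons_eq_cons.mp hf0
          congr 1
          apply ih zs' hy' hz'
          intro k
          by_cases hk : k = pvOnes y
          · subst hk; exact htl
          · have h := hf k
            simp only [List.filter_cons] at h
            rw [if_neg (by simp; omega), if_neg (by rw [← hyz]; simp; omega)] at h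
            exact h

-- ===== VERDICT (by name: the statement is the Claim_ definition above) =====
theorem sortbyones_spec : Claim_equal_sortbyones := by
  intro L _
  unfold Spec_sortbyones
  exact stable_unique _ _ (bubble_sorted L) (alt_sorted L)
    (fun k => (bubble_filter L k).trans (alt_filter L k).symm)
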